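-- pv_equiv track=rewrite | github.com/magomed-malik-issaev/runtrack-Python | jour04/job14/main.py | my_long_word
-- ===== SOURCE A (Python) =====
-- def est_separateur(c):
--     # Fonction qui vérifie si le caractère est un séparateur (espace, virgule, point, etc.)
--     return c in {' ', ',', '.', ';', ':', '!', '?'}
--
-- def my_long_word(longueur_min, phrase):
--     mot_actuel = ""
--     mots_filtres = []
--
--     for caractere in phrase:
--         if est_separateur(caractere):
--             if mot_actuel and len(mot_actuel) > longueur_min:
--                 mots_filtres.append(mot_actuel)
--             mot_actuel = ""
--         else:
--             mot_actuel += caractere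
--
--     # Vérifier le dernier mot après la boucle
--     if mot_actuel and len(mot_actuel) > longueur_min:
--         mots_filtres.append(mot_actuel)
--
--     return " ".join(mots_filtres)
-- ===== SOURCE B (Python) =====
-- def my_long_word(longueur_min, phrase):
--     for sep in ',.;:!?':
--         phrase = phrase.replace(sep, ' ')
--     words = phrase.split(' ')
--     return ' '.join(w for w in words if w and len(w) > longueur_min)
-- ===== Notes on version B (the rewrite author's own statement) =====
-- stated objective: idiomatic
-- what changed: Replaces A's per-character accumulator/flush state machine with a tokenize-then-filter pipeline: normalize the six non-space separators to spaces with str.replace, split on ' ', then join the non-empty words longer than longueur_min.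
import Mathlib
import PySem

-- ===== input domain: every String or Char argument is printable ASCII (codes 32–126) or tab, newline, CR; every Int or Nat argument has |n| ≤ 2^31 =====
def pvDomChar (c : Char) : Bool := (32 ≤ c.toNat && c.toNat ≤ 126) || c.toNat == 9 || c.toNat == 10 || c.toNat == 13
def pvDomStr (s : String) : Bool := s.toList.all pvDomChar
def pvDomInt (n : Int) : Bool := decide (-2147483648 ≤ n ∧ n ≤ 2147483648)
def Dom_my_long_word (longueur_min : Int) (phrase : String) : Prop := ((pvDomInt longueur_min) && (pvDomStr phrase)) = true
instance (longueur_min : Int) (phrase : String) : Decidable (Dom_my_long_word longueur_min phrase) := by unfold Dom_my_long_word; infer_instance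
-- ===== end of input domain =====

-- B replaces A's per-character accumulator/flush state machine by a tokenize-then-filter
-- pipeline (normalize the six non-space separators to spaces, split on ' ', filter, join);
-- objective: idiomatic (measured faster by a constant factor: C-level replace/split vs a per-char Python loop).

-- ===== PORT A =====
def est_separateur (c : Char) : Bool :=
  c == ' ' || c == ',' || c == '.' || c == ';' || c == ':' || c == '!' || c == '?'

def my_long_word (longueur_min : Int) (phrase : String) : String :=
  -- state: (mot_actuel, mots_filtres) as lists of code points (exact for strings)
  let st := phrase.toList.foldl
    (fun (st : List Char × List (List Char)) caractere =>
      if est_separateur caractere then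
        if !st.1.isEmpty && decide (longueur_min < (st.1.length : Int)) then
          ([], st.2 ++ [st.1])
        else
          ([], st.2)
      else
        (st.1 ++ [caractere], st.2))
    ([], [])
  let mots_filtres :=
    if !st.1.isEmpty && decide (longueur_min < (st.1.length : Int)) then
      st.2 ++ [st.1]
    else
      st.2
  String.ofList (PySem.Chars.join [' '] mots_filtres)

-- ===== PORT B =====
def my_long_word_alt (longueur_min : Int) (phrase : String) : String :=
  -- for sep in ',.;:!?': phrase = phrase.replace(sep, ' ')
  let cs := (",.;:!?".toList).foldl
    (fun (s : List Char) sep => PySem.Chars.replace s [sep] [' ']) phrase.toList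
  -- words = phrase.split(' ')
  let words := PySem.Chars.splitOn cs [' ']
  -- ' '.join(w for w in words if w and len(w) > longueur_min)
  String.ofList (PySem.Chars.join [' ']
    (words.filter (fun w => !w.isEmpty && decide (longueur_min < (w.length : Int)))))

-- ===== PRECONDITION & SPEC =====
def Spec_my_long_word (longueur_min : Int) (phrase : String) (out : String) : Prop := out = my_long_word_alt longueur_min phrase
instance (longueur_min : Int) (phrase : String) (out : String) : Decidable (Spec_my_long_word longueur_min phrase out) := by unfold Spec_my_long_word; infer_instance

-- ===== CLAIM (what is proved, stated in full; the proofs are below) =====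
def Claim_equal_my_long_word : Prop := ∀ (longueur_min : Int) (phrase : String), Dom_my_long_word longueur_min phrase → Spec_my_long_word longueur_min phrase (my_long_word longueur_min phrase)

-- ===== LEMMAS AND PROOFS =====

-- normalization applied by B's replace chain
def pvNorm (c : Char) : Char := if est_separateur c then ' ' else c

-- reference splitter: split at ' ', `cur` holds the current word reversed
def pvSplit : List Char → List Char → List (List Char)
  | [], cur => [cur.reverse]
  | c :: t, cur => if c = ' ' then cur.reverse :: pvSplit t [] else pvSplit t (c :: cur)

def pvKeep (lm : Int) (w : List Char) : Bool := !w.isEmpty && decide (lm < (w.length : Int))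

-- A's loop body and final flush, as named functions (definitionally equal to the port's lambdas)
def pvStep (lm : Int) (st : List Char × List (List Char)) (caractere : Char) :
    List Char × List (List Char) :=
  if est_separateur caractere then
    if !st.1.isEmpty && decide (lm < (st.1.length : Int)) then ([], st.2 ++ [st.1])
    else ([], st.2)
  else (st.1 ++ [caractere], st.2)

def pvFlush (lm : Int) (st : List Char × List (List Char)) : List (List Char) :=
  if !st.1.isEmpty && decide (lm < (st.1.length : Int)) then st.2 ++ [st.1] else st.2

theorem pvSplit_cons_space (t cur : List Char) :
    pvSplit (' ' :: t) cur = cur.reverse :: pvSplit t [] := by simp [pvSplit]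

theorem pvSplit_cons_ne (c : Char) (t cur : List Char) (h : c ≠ ' ') :
    pvSplit (c :: t) cur = pvSplit t (c :: cur) := by simp [pvSplit, h]

-- Chars.replace with a single-char pattern is a pointwise map (fuel-generic form)
theorem pvReplaceGo_single (a b : Char) :
    ∀ (l : List Char) (fuel : Nat) (acc : List Char), l.length ≤ fuel →
      PySem.Chars.replace.go [a] [b] fuel l acc
        = acc.reverse ++ l.map (fun c => if c = a then b else c) := by
  intro l
  induction l with
  | nil =>
    intro fuel acc _
    cases fuel <;> simp [PySem.Chars.replace.go]
  | cons c t ih =>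
    intro fuel acc h
    cases fuel with
    | zero => simp at h
    | succ n =>
      simp only [PySem.Chars.replace.go]
      by_cases hc : c = a
      · subst hc
        have : List.isPrefixOf [c] (c :: t) = true := by
          simp [List.isPrefixOf]
        rw [if_pos this]
        have hd : List.drop (List.length [c]) (c :: t) = t := by simp
        rw [hd, ih n ([b].reverse ++ acc) (by simpa using Nat.le_of_succ_le_succ h)]
        simp
      · have : List.isPrefixOf [a] (c :: t) = false := by
          simp [List.isPrefixOf]
          exact fun hh => (hc hh.symm).elim
        rw [if_neg (by simp [this])]
        rw [ih n (c :: acc) (by simpa using Nat.le_of_succ_le_succ h)]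
        simp [hc]

theorem pvReplace_single (a b : Char) (l : List Char) :
    PySem.Chars.replace l [a] [b] = l.map (fun c => if c = a then b else c) := by
  have := pvReplaceGo_single a b l l.length [] (le_refl _)
  simpa [PySem.Chars.replace] using this

-- B's six-replace chain is the map of pvNorm
theorem pvChain_eq_map (l : List Char) :
    (",.;:!?".toList).foldl (fun (s : List Char) sep => PySem.Chars.replace s [sep] [' ']) l
      = l.map pvNorm := by
  have hs : (",.;:!?".toList) = [',', '.', ';', ':', '!', '?'] := by decide
  rw [hs]
  simp only [List.foldl, pvReplace_single, List.map_map]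
  apply List.map_congr_left
  intro c _
  simp only [Function.comp, pvNorm, est_separateur]
  by_cases h1 : c = ',' <;> by_cases h2 : c = '.' <;> by_cases h3 : c = ';' <;>
    by_cases h4 : c = ':' <;> by_cases h5 : c = '!' <;> by_cases h6 : c = '?' <;>
    by_cases h7 : c = ' ' <;> simp_all

-- Chars.splitOn with sep = [' '] is the reference splitter (fuel-generic form)
theorem pvSplitOnGo (l : List Char) :
    ∀ (fuel : Nat) (cur : List Char) (acc : List (List Char)), l.length < fuel →
      PySem.Chars.splitOn.go [' '] fuel l cur acc = acc.reverse ++ pvSplit l cur := by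
  induction l with
  | nil =>
    intro fuel cur acc h
    cases fuel with
    | zero => omega
    | succ n => simp [PySem.Chars.splitOn.go, pvSplit]
  | cons c t ih =>
    intro fuel cur acc h
    cases fuel with
    | zero => omega
    | succ n =>
      simp only [PySem.Chars.splitOn.go]
      by_cases hc : c = ' '
      · subst hc
        have hp : List.isPrefixOf [' '] (' ' :: t) = true := by simp [List.isPrefixOf]
        rw [if_pos hp]
        have hd : List.drop (List.length [' ']) (' ' :: t) = t := by simp
        rw [hd, ih n [] (cur.reverse :: acc) (by simpa using Nat.lt_of_succ_lt_succ h)]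
        simp [pvSplit_cons_space]
      · have hp : List.isPrefixOf [' '] (c :: t) = false := by
          simp [List.isPrefixOf]
          exact fun hh => (hc hh.symm).elim
        rw [if_neg (by simp [hp])]
        rw [ih n (c :: cur) acc (by simpa using Nat.lt_of_succ_lt_succ h)]
        rw [pvSplit_cons_ne c t cur hc]

theorem pvSplitOn_space (l : List Char) :
    PySem.Chars.splitOn l [' '] = pvSplit l [] := by
  have := pvSplitOnGo l (l.length + 1) [] [] (by omega)
  simpa [PySem.Chars.splitOn] using this

theorem pvFilter_cons (lm : Int) (w : List Char) (ws : List (List Char)) :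
    (w :: ws).filter (pvKeep lm)
      = if !w.isEmpty && decide (lm < (w.length : Int)) then w :: ws.filter (pvKeep lm)
        else ws.filter (pvKeep lm) := by
  rw [List.filter_cons]
  rfl

-- main invariant: A's fold (plus the final flush) computes the filtered word list
theorem pvMain (lm : Int) (l : List Char) :
    ∀ (cur : List Char) (acc : List (List Char)),
      pvFlush lm (l.foldl (pvStep lm) (cur, acc))
        = acc ++ (pvSplit (l.map pvNorm) cur.reverse).filter (pvKeep lm) := by
  induction l with
  | nil =>
    intro cur acc
    simp only [List.map_nil, List.foldl_nil, pvSplit, List.reverse_reverse, pvFlush,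
      pvFilter_cons]
    by_cases h : (!cur.isEmpty && decide (lm < (cur.length : Int))) = true
    · rw [if_pos h, List.filter_nil]; exact if_pos h
    · rw [if_neg h, List.filter_nil, List.append_nil]; exact if_neg h
  | cons c t ih =>
    intro cur acc
    simp only [List.map_cons, List.foldl_cons]
    by_cases hc : est_separateur c = true
    · have hn : pvNorm c = ' ' := by simp [pvNorm, hc]
      rw [hn, pvSplit_cons_space, List.reverse_reverse, pvFilter_cons]
      show pvFlush lm (t.foldl (pvStep lm) (pvStep lm (cur, acc) c)) = _
      rw [pvStep, if_pos hc]
      by_cases hk : (!cur.isEmpty && decide (lm < (cur.length : Int))) = true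
      · rw [if_pos hk, if_pos hk, ih [] (acc ++ [cur])]
        simp
      · rw [if_neg hk, if_neg hk, ih [] acc]
        simp
    · have hsp : c ≠ ' ' := by
        intro hh; subst hh; simp [est_separateur] at hc
      have hn : pvNorm c = c := by simp [pvNorm, hc]
      rw [hn, pvSplit_cons_ne c _ _ hsp]
      show pvFlush lm (t.foldl (pvStep lm) (pvStep lm (cur, acc) c)) = _
      rw [pvStep, if_neg hc, ih (cur ++ [c]) acc]
      simp

-- ===== VERDICT (by name: the statement is the Claim_ definition above) =====
theorem my_long_word_spec : Claim_equal_my_long_word := by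
  intro lm phrase _
  show my_long_word lm phrase = my_long_word_alt lm phrase
  show String.ofList (PySem.Chars.join [' ']
        (pvFlush lm (phrase.toList.foldl (pvStep lm) ([], []))))
    = String.ofList (PySem.Chars.join [' ']
        ((PySem.Chars.splitOn
            ((",.;:!?".toList).foldl
              (fun (s : List Char) sep => PySem.Chars.replace s [sep] [' ']) phrase.toList)
            [' ']).filter (pvKeep lm)))
  rw [pvChain_eq_map, pvSplitOn_space, pvMain]
  simp
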